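-- pv_equiv track=rewrite | github.com/AndreiHondrari/software-engineering-exploration | data_structures_and_algorithms/01_elementary/03_integers/13_generate_alternating_digits.py | generate_alternating_digits
-- ===== SOURCE A (Python) =====
-- from typing import List
--
-- def generate_alternating_digits(
--     no_of_digits: int,
--     digits: List[int]
-- ) -> int:
--
--     result: int = 0
--
--     for i in range(no_of_digits):
--         index: int = i % len(digits)
--         result += digits[index] * 10**i
--
--     return result
-- ===== SOURCE B (Python) =====
-- def generate_alternating_digits(no_of_digits, digits):
--     # Closed-form by cycles: the value of one full digit block times a
--     # "repunit" of base 10**len(digits), plus the leftover partial block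
--     # shifted past the full cycles.
--     if no_of_digits <= 0:
--         return 0
--     q, r = divmod(no_of_digits, len(digits))
--     block = 0
--     for d in reversed(digits):
--         block = block * 10 + d
--     partial = 0
--     for d in reversed(digits[:r]):
--         partial = partial * 10 + d
--     base = 10 ** (len(digits) * q)
--     repunit = (base - 1) // (10 ** len(digits) - 1)
--     return block * repunit + partial * base
-- ===== Notes on version B (the rewrite author's own statement) =====
-- stated objective: alternative
-- what changed: B replaces A's per-digit loop (summing digits[i%len]*10**i over range(n)) by a closed form: divmod splits n into q full cycles and a remainder r, two Horner loops over the digit list compute the block value and the partial value, and the q repetitions are assembled via the exact repunit division (10**(len*q)-1)//(10**len-1).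
import Mathlib
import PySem

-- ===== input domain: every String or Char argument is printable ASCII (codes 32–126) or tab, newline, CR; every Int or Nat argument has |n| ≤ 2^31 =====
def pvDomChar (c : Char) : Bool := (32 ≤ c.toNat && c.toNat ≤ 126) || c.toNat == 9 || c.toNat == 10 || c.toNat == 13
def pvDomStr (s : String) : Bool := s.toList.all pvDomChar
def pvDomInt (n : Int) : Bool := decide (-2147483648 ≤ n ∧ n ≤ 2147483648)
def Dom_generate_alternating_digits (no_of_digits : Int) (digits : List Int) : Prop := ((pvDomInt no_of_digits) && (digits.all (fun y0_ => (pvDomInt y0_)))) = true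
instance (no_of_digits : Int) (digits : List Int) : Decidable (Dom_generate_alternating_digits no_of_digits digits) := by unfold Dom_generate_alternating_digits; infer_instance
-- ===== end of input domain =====

-- B replaces A's digit-by-digit loop by a closed form over full cycles: the Horner value of one
-- digit block times a base-10^len repunit, plus the leftover partial block shifted past the cycles
-- (an alternative algorithm: O(len(digits)) loop iterations instead of O(no_of_digits)).


-- ===== PORT A =====
-- for i in range(no_of_digits): result += digits[i % len(digits)] * 10**i
-- (10**i ported as 10 ^ i.toNat: i is drawn from range(no_of_digits), hence 0 ≤ i, so this is exact)
def generate_alternating_digits (no_of_digits : Int) (digits : List Int) : Int :=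
  (PySem.List.pyRange 0 no_of_digits 1).foldl
    (fun result i =>
      result + PySem.List.pyGetD digits (PySem.Int.mod i (PySem.List.len digits)) 0 * 10 ^ i.toNat)
    0

-- ===== PORT B =====
-- closed form: q, r = divmod(n, len); two Horner loops over the digit LIST (reversed) for the
-- block value and the partial value; repunit = (10**(len*q) - 1) // (10**len - 1).
-- (the exponents len*q and len are ported via .toNat / .length: both are nonnegative here)
def generate_alternating_digits_alt (no_of_digits : Int) (digits : List Int) : Int :=
  if no_of_digits ≤ 0 then 0
  else
    let q := PySem.Int.floordiv no_of_digits (PySem.List.len digits)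
    let r := PySem.Int.mod no_of_digits (PySem.List.len digits)
    let block := digits.reverse.foldl (fun b d => b * 10 + d) 0
    let part := (PySem.List.slice digits none (some r)).reverse.foldl (fun b d => b * 10 + d) 0
    let base := 10 ^ ((PySem.List.len digits) * q).toNat
    let repunit := PySem.Int.floordiv (base - 1) (10 ^ digits.length - 1)
    block * repunit + part * base

-- ===== PRECONDITION & SPEC =====
-- Pre_ excludes exactly the inputs where Python A raises ZeroDivisionError:
-- digits == [] together with no_of_digits > 0 (the loop body computes i % len(digits)).
def Pre_generate_alternating_digits (no_of_digits : Int) (digits : List Int) : Prop :=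
  digits ≠ [] ∨ no_of_digits ≤ 0
instance (no_of_digits : Int) (digits : List Int) : Decidable (Pre_generate_alternating_digits no_of_digits digits) := by unfold Pre_generate_alternating_digits; infer_instance
def pvWitness_generate_alternating_digits : Int × List Int := (5, [1, 2, 3])

def Spec_generate_alternating_digits (no_of_digits : Int) (digits : List Int) (out : Int) : Prop := out = generate_alternating_digits_alt no_of_digits digits
instance (no_of_digits : Int) (digits : List Int) (out : Int) : Decidable (Spec_generate_alternating_digits no_of_digits digits out) := by unfold Spec_generate_alternating_digits; infer_instance

-- ===== CLAIM (what is proved, stated in full; the proofs are below) =====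
def Claim_equal_generate_alternating_digits : Prop := ∀ (no_of_digits : Int) (digits : List Int), Dom_generate_alternating_digits no_of_digits digits → Pre_generate_alternating_digits no_of_digits digits → Spec_generate_alternating_digits no_of_digits digits (generate_alternating_digits no_of_digits digits)

-- ===== LEMMAS AND PROOFS =====

-- LSB-first value of a digit list (proof-side characterisation of B's Horner loops).
def pvVal : List Int → Int
  | [] => 0
  | x :: t => x + 10 * pvVal t

-- B's Horner loop over a reversed list computes the LSB-first value (plus the shifted accumulator).
theorem pvHorner (l : List Int) (a : Int) :
    l.reverse.foldl (fun b d => b * 10 + d) a = a * 10 ^ l.length + pvVal l := by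
  induction l generalizing a with
  | nil => simp [pvVal]
  | cons x t ih =>
      simp [List.foldl_append, ih, pvVal, pow_succ]
      ring

theorem pvVal_eq_sum (l : List Int) :
    pvVal l = ∑ j ∈ Finset.range l.length, l.getD j 0 * 10 ^ j := by
  induction l with
  | nil => simp [pvVal]
  | cons x t ih =>
      rw [List.length_cons, Finset.sum_range_succ']
      simp only [List.getD_cons_succ, List.getD_cons_zero, pow_succ, pow_zero, pvVal, ih]
      rw [Finset.mul_sum]
      ring_nf

theorem pvVal_take (l : List Int) (r : Nat) (hr : r ≤ l.length) :
    pvVal (l.take r) = ∑ j ∈ Finset.range r, l.getD j 0 * 10 ^ j := by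
  rw [pvVal_eq_sum, List.length_take, Nat.min_eq_left hr]
  refine Finset.sum_congr rfl (fun j hj => ?_)
  have hjr : j < r := Finset.mem_range.mp hj
  have : j < l.length := lt_of_lt_of_le hjr hr
  rw [List.getD_eq_getElem _ _ (by simpa [Nat.min_eq_left hr] using hjr),
      List.getD_eq_getElem _ _ this, List.getElem_take]

-- The heart of the equivalence: the cyclic weighted digit sum splits into
-- q full blocks (a geometric repunit) plus the shifted partial block.
theorem pvCycle (ds : List Int) (q r : Nat) (_hL : 0 < ds.length) (hr : r < ds.length) :
    ∑ i ∈ Finset.range (ds.length * q + r), ds.getD (i % ds.length) 0 * 10 ^ i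
      = pvVal ds * (∑ k ∈ Finset.range q, ((10 : Int) ^ ds.length) ^ k)
        + pvVal (ds.take r) * 10 ^ (ds.length * q) := by
  induction q with
  | zero =>
      simp only [Finset.range_zero, Finset.sum_empty, mul_zero,
        zero_add, pow_zero, mul_one]
      rw [pvVal_take ds r (le_of_lt hr)]
      refine Finset.sum_congr rfl (fun i hi => ?_)
      have : i < ds.length := lt_of_lt_of_le (Finset.mem_range.mp hi) (le_of_lt hr)
      rw [Nat.mod_eq_of_lt this]
  | succ q ih =>
      have hsplit : ds.length * (q + 1) + r = ds.length + (ds.length * q + r) := by ring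
      rw [hsplit, Finset.sum_range_add]
      have h1 : ∑ i ∈ Finset.range ds.length, ds.getD (i % ds.length) 0 * 10 ^ i = pvVal ds := by
        rw [pvVal_eq_sum]
        refine Finset.sum_congr rfl (fun i hi => ?_)
        rw [Nat.mod_eq_of_lt (Finset.mem_range.mp hi)]
      have h2 : ∑ i ∈ Finset.range (ds.length * q + r),
          ds.getD ((ds.length + i) % ds.length) 0 * 10 ^ (ds.length + i)
          = 10 ^ ds.length * ∑ i ∈ Finset.range (ds.length * q + r),
              ds.getD (i % ds.length) 0 * 10 ^ i := by
        rw [Finset.mul_sum]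
        refine Finset.sum_congr rfl (fun i _ => ?_)
        rw [Nat.add_mod_left, pow_add]
        ring
      rw [h1, h2, ih, geom_sum_succ]
      have hp : ds.length * (q + 1) = ds.length * q + ds.length := by ring
      rw [hp, pow_add]
      ring

-- A's loop over range m, with an arbitrary accumulator, is the weighted digit sum.
theorem pvA_sum (d : Int → Int) (m : Nat) (a : Int) :
    (((List.range m).map (fun k : Nat => (k : Int))).foldl
      (fun result i => result + d i * 10 ^ i.toNat) a)
    = a + (∑ k ∈ Finset.range m, d (k : Int) * 10 ^ k) := by
  induction m generalizing a with
  | zero => simp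
  | succ m ih =>
      rw [List.range_succ, Finset.sum_range_succ]
      simp [ih]
      ring

-- the geometric repunit is exactly B's floor division (which is exact here)
theorem pvRepunit (L q : Nat) (hL : 0 < L) :
    PySem.Int.floordiv ((10 : Int) ^ (L * q) - 1) ((10 : Int) ^ L - 1)
      = ∑ k ∈ Finset.range q, ((10 : Int) ^ L) ^ k := by
  have hne : (10 : Int) ^ L - 1 ≠ 0 := by
    have : (10 : Int) ^ 1 ≤ 10 ^ L := pow_le_pow_right₀ (by norm_num) hL
    simp at this; omega
  have hmul : (∑ k ∈ Finset.range q, ((10 : Int) ^ L) ^ k) * ((10 : Int) ^ L - 1)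
      = (10 : Int) ^ (L * q) - 1 := by
    rw [geom_sum_mul, ← pow_mul, Nat.mul_comm]
  have : PySem.Int.floordiv ((10 : Int) ^ (L * q) - 1) ((10 : Int) ^ L - 1)
      = ((∑ k ∈ Finset.range q, ((10 : Int) ^ L) ^ k) * ((10 : Int) ^ L - 1)).fdiv
          ((10 : Int) ^ L - 1) := by rw [hmul]; rfl
  rw [this, Int.mul_fdiv_cancel _ hne]

-- ===== VERDICT (by name: the statement is the Claim_ definition above) =====
theorem generate_alternating_digits_spec : Claim_equal_generate_alternating_digits := by
  intro n digits _ hpre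
  unfold Spec_generate_alternating_digits generate_alternating_digits generate_alternating_digits_alt
  by_cases hn : n ≤ 0
  · rw [if_pos hn, PySem.List.pyRange_one_eq_nil (by omega)]
    rfl
  · rw [if_neg hn]
    have hds : digits ≠ [] := by
      rcases hpre with h | h
      · exact h
      · omega
    have hL : 0 < digits.length := List.length_pos_iff.mpr hds
    have hn0 : 0 ≤ n := by omega
    have hnN : n = ((n.toNat : Nat) : Int) := (Int.toNat_of_nonneg hn0).symm
    have hlen : PySem.List.len digits = ((digits.length : Nat) : Int) := by
      simp [PySem.List.len_eq]
    -- A side: reduce the loop to the weighted cyclic digit sum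
    rw [PySem.List.pyRange_one]
    simp only [zero_add, Int.sub_zero]
    rw [hnN, Int.toNat_natCast,
        pvA_sum (fun i => PySem.List.pyGetD digits (PySem.Int.mod i (PySem.List.len digits)) 0)
          n.toNat 0,
        zero_add]
    have hAsum : ∀ k : Nat,
        PySem.List.pyGetD digits (PySem.Int.mod ((k : Nat) : Int) (PySem.List.len digits)) 0
          = digits.getD (k % digits.length) 0 := by
      intro k
      rw [hlen, PySem.Int.mod_natCast, PySem.List.pyGetD_natCast]
    simp only [hAsum]
    -- decompose n.toNat into full cycles and remainder, then apply the cycle lemma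
    have hrlt : n.toNat % digits.length < digits.length := Nat.mod_lt _ hL
    have hA : ∑ k ∈ Finset.range n.toNat, digits.getD (k % digits.length) 0 * 10 ^ k
        = pvVal digits
            * (∑ k ∈ Finset.range (n.toNat / digits.length), ((10 : Int) ^ digits.length) ^ k)
          + pvVal (digits.take (n.toNat % digits.length))
            * 10 ^ (digits.length * (n.toNat / digits.length)) := by
      conv_lhs =>
        rw [show n.toNat = digits.length * (n.toNat / digits.length) + n.toNat % digits.length
              from (Nat.div_add_mod n.toNat digits.length).symm]
      exact pvCycle digits (n.toNat / digits.length) (n.toNat % digits.length) hL hrlt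
    rw [hA]
    -- B side: evaluate divmod, the slice, the Horner loops and the repunit
    rw [hlen, hnN, PySem.Int.floordiv_natCast, PySem.Int.mod_natCast,
        PySem.List.slice_to_natCast, pvHorner, pvHorner]
    simp only [Int.toNat_natCast]
    have hbase : (((digits.length : Nat) : Int) * ((n.toNat / digits.length : Nat) : Int)).toNat
        = digits.length * (n.toNat / digits.length) := by
      rw [← Int.natCast_mul, Int.toNat_natCast]
    rw [hbase, pvRepunit digits.length (n.toNat / digits.length) hL]
    ring
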